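-- pv_equiv track=rewrite | github.com/JeroenWeener/Libertas | sigma_client.py | _s_k_p2
-- ===== SOURCE A (Python) =====
-- from typing import List, Set
--
-- def _s_k_p2(
--
--         w: str,
-- ) -> Set[str]:
--     """Generates the S_K^(p2) set for a keyword.
--     Set items are of the form '{occurrence}:-:{character 1},{character 2}'.
--
--     :param w: The keyword for which the set is to be generated
--     :type w: str
--     :returns: The S_K^(p2) set of the keyword
--     :rtype: Set[str]
--     """
--     pairs = ['-:' + w[c1] + ',' + w[c2] for c1 in range(len(w)) for c2 in range(c1 + 1, len(w))]
--     unique_pairs = list(set(pairs))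
--     pair_count_dict = {pair: pairs.count(pair) for pair in unique_pairs}
--     return set([str(count + 1) + ':' + pair for pair in pair_count_dict.keys() for count in
--                 range(pair_count_dict[pair])])
-- ===== SOURCE B (Python) =====
-- def _s_k_p2(
--         w: str,
-- ):
--     """Character-level algorithm: pair counts are derived from running
--     per-character tallies (for each new character ch, every character a seen
--     m times so far contributes m to the count of pair (a, ch)), so no pair is
--     ever counted by scanning a pair list; a single dedup pass over the index
--     pairs then expands each pair to its occurrences 1..count."""
--     cnt = {}
--     prefix = {}
--     for ch in w:
--         for a, m in prefix.items():
--             key = '-:' + a + ',' + ch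
--             cnt[key] = cnt.get(key, 0) + m
--         prefix[ch] = prefix.get(ch, 0) + 1
--     out = []
--     seen = set()
--     n = len(w)
--     for c1 in range(n):
--         for c2 in range(c1 + 1, n):
--             pair = '-:' + w[c1] + ',' + w[c2]
--             if pair not in seen:
--                 seen.add(pair)
--                 out.extend(str(i) + ':' + pair for i in range(1, cnt[pair] + 1))
--     return set(out)
-- ===== Notes on version B (the rewrite author's own statement) =====
-- stated objective: alternative
-- what changed: A materialises the full index-pair list, dedups it with set(), and rescans it with pairs.count for every unique pair before expanding; B never counts pairs by scanning a pair list: it derives every pair count from a running per-character tally (each new character ch adds the seen-count of a to the count of pair (a,ch)) and emits the numbered occurrences in a single dedup pass over the index pairs.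
import Mathlib
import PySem

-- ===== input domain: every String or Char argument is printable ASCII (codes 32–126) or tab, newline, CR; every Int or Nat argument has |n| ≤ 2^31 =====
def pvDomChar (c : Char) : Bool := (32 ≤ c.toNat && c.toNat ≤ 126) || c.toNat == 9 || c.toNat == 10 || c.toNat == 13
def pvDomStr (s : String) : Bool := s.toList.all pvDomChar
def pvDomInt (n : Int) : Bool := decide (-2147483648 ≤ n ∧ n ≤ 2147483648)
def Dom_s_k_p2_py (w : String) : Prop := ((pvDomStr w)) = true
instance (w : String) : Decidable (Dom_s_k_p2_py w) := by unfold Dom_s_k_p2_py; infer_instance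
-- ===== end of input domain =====

-- B derives the pair counts from running per-character tallies (never counting pairs)
-- and emits the occurrence-numbered strings in one dedup pass over the index pairs.

-- w[c] as a 1-character string (both Pythons index only in range, so the default is never used)
def pvCharAt (w : String) (i : Int) : String :=
  String.singleton ((PySem.Str.pyGet? w i).getD ' ')

-- ===== PORT A =====
def pvPairsA (w : String) : List String :=
  (PySem.List.pyRange 0 (PySem.Str.len w) 1).flatMap fun c1 =>
    (PySem.List.pyRange (c1 + 1) (PySem.Str.len w) 1).map fun c2 =>
      "-:" ++ pvCharAt w c1 ++ "," ++ pvCharAt w c2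

def s_k_p2_py (w : String) : List String :=
  let pairs := pvPairsA w
  let uniquePairs := PySem.Set.ofList pairs
  let pairCountDict : PySem.Dict String Int :=
    uniquePairs.foldl (fun d p => d.insert p ((pairs.count p : Int))) PySem.Dict.empty
  PySem.Set.ofList <|
    pairCountDict.keys.flatMap fun pair =>
      (PySem.List.pyRange 0 (pairCountDict.getD pair 0) 1).map fun count =>
        PySem.Int.toStr (count + 1) ++ ":" ++ pair

-- ===== PORT B =====
-- tally loop: for ch in w: for a, m in prefix.items(): cnt[key] = cnt.get(key,0)+m; prefix[ch] = prefix.get(ch,0)+1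
def pvTallyB (w : String) : PySem.Dict String Int × PySem.Dict String Int :=
  w.toList.foldl
    (fun (pd : PySem.Dict String Int × PySem.Dict String Int) ch =>
      (pd.2.items.foldl
        (fun cnt am =>
          -- key = '-:' + a + ',' + ch
          cnt.modify ("-:" ++ am.1 ++ "," ++ String.singleton ch) 0 (· + am.2)) pd.1,
       pd.2.modify (String.singleton ch) 0 (· + 1)))
    (PySem.Dict.empty, PySem.Dict.empty)

def s_k_p2_py_alt (w : String) : List String :=
  let cnt := (pvTallyB w).1
  let n := PySem.Str.len w
  -- emission pass; cnt[pair] is always present here, so the total getD is exact for cnt[pair]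
  let so :=
    (PySem.List.pyRange 0 n 1).foldl
      (fun (so : PySem.Set String × List String) c1 =>
        (PySem.List.pyRange (c1 + 1) n 1).foldl
          (fun so c2 =>
            let pair := "-:" ++ pvCharAt w c1 ++ "," ++ pvCharAt w c2
            if so.1.contains pair then so
            else (so.1.add pair,
                  so.2 ++ (PySem.List.pyRange 1 (cnt.getD pair 0 + 1) 1).map
                            (fun i => PySem.Int.toStr i ++ ":" ++ pair)))
          so)
      (PySem.Set.empty, [])
  PySem.Set.ofList so.2

-- ===== PRECONDITION & SPEC =====
def Spec_s_k_p2_py (w : String) (out : List String) : Prop := out = s_k_p2_py_alt w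
instance (w : String) (out : List String) : Decidable (Spec_s_k_p2_py w out) := by unfold Spec_s_k_p2_py; infer_instance

-- ===== CLAIM (what is proved, stated in full; the proofs are below) =====
def Claim_equal_s_k_p2_py : Prop := ∀ (w : String), Dom_s_k_p2_py w → Spec_s_k_p2_py w (s_k_p2_py w)

-- ===== LEMMAS AND PROOFS =====

-- the pair string for two characters
def pvKey (a b : Char) : String := "-:" ++ String.singleton a ++ "," ++ String.singleton b

-- row-major pair list of a character list (structural form of A's comprehension)
def pvRowPairs : List Char → List String
  | [] => []
  | a :: u => u.map (pvKey a) ++ pvRowPairs u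

theorem pvKey_inj_left {x s t : String}
    (h : "-:" ++ s ++ "," ++ x = "-:" ++ t ++ "," ++ x) : s = t := by
  have h' : ('-' :: ':' :: (s.toList ++ (',' :: x.toList)))
      = ('-' :: ':' :: (t.toList ++ (',' :: x.toList))) := by
    have := congrArg String.toList h
    simpa [String.toList_append] using this
  have h2 : s.toList ++ (',' :: x.toList) = t.toList ++ (',' :: x.toList) := by
    simpa using h'
  have h3 : s.toList = t.toList := by
    have := List.append_cancel_right h2
    exact this
  exact String.toList_inj.mp h3

-- shifting a unit range by one
theorem pyRange_shift (a b : Int) :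
    PySem.List.pyRange (a + 1) (b + 1) 1 = (PySem.List.pyRange a b 1).map (· + 1) := by
  rw [PySem.List.pyRange_one, PySem.List.pyRange_one]
  have h : (b + 1 - (a + 1)).toNat = (b - a).toNat := by omega
  rw [h, List.map_map]
  apply List.map_congr_left
  intro k _
  simp
  ring

theorem pyGet?_cons_succ (x : Char) (u : List Char) (i : Int) (h : 0 ≤ i) :
    PySem.List.pyGet? (x :: u) (i + 1) = PySem.List.pyGet? u i := by
  obtain ⟨k, rfl⟩ : ∃ k : Nat, i = (k : Int) := ⟨i.toNat, (Int.toNat_of_nonneg h).symm⟩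
  rw [show ((k : Int) + 1) = ((k + 1 : Nat) : Int) by push_cast; ring]
  simp

theorem pyGetD_cons_succ (x : Char) (u : List Char) (i : Int) (h : 0 ≤ i) :
    PySem.List.pyGetD (x :: u) (i + 1) ' ' = PySem.List.pyGetD u i ' ' := by
  show (PySem.List.pyGet? (x :: u) (i + 1)).getD ' ' = _
  rw [pyGet?_cons_succ x u i h]
  rfl

theorem map_g_pyGetD (xs : List Char) (g : Char → String) :
    (PySem.List.pyRange 1 (PySem.List.len xs) 1).map (fun j => g (PySem.List.pyGetD xs j ' '))
      = (xs.drop 1).map g := by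
  have h := PySem.List.map_pyGetD_pyRange (xs := xs) (a := 1) (d := ' ') (show (0:Int) ≤ 1 by omega)
  calc (PySem.List.pyRange 1 (PySem.List.len xs) 1).map (fun j => g (PySem.List.pyGetD xs j ' '))
      = ((PySem.List.pyRange 1 (PySem.List.len xs) 1).map (fun j => PySem.List.pyGetD xs j ' ')).map g := by
        rw [List.map_map]
        rfl
    _ = (xs.drop (1:Int).toNat).map g := by rw [h]
    _ = (xs.drop 1).map g := rfl

theorem pvPairsA_aux (u : List Char) :
    (PySem.List.pyRange 0 (u.length : Int) 1).flatMap (fun c1 =>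
      (PySem.List.pyRange (c1 + 1) (u.length : Int) 1).map (fun c2 =>
        "-:" ++ String.singleton (PySem.List.pyGetD u c1 ' ') ++ ","
          ++ String.singleton (PySem.List.pyGetD u c2 ' ')))
      = pvRowPairs u := by
  induction u with
  | nil => simp [pvRowPairs, PySem.List.pyRange_one_eq_nil]
  | cons a u ih =>
    simp only [pvRowPairs, List.length_cons, Nat.cast_add, Nat.cast_one]
    rw [PySem.List.pyRange_one_cons (by omega), List.flatMap_cons]
    congr 1
    · -- the first row: pairs (0, c2)
      have h0 : PySem.List.pyGetD (a :: u) 0 ' ' = a := PySem.List.pyGetD_zero_cons a u ' '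
      simp only [h0, zero_add]
      have := map_g_pyGetD (a :: u) (fun c => "-:" ++ String.singleton a ++ "," ++ String.singleton c)
      simp only [PySem.List.len_eq, List.length_cons, Nat.cast_add, Nat.cast_one] at this
      rw [this]
      rfl
    · -- the remaining rows: shift every index down by one
      rw [pyRange_shift 0 ((u.length : Int)), List.flatMap_map]
      rw [← ih]
      apply List.flatMap_congr
      intro c1 hc1
      have hc1' : 0 ≤ c1 ∧ c1 < (u.length : Int) := by
        have := (PySem.List.mem_pyRange_one).mp hc1
        omega
      rw [show c1 + 1 + 1 = (c1 + 1) + 1 from rfl, pyRange_shift (c1 + 1) ((u.length : Int)),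
        List.map_map]
      apply List.map_congr_left
      intro c2 hc2
      have hc2' : c1 + 1 ≤ c2 ∧ c2 < (u.length : Int) := by
        have := (PySem.List.mem_pyRange_one).mp hc2
        omega
      simp only [Function.comp]
      rw [pyGetD_cons_succ a u c1 (by omega), pyGetD_cons_succ a u c2 (by omega)]

-- pvPairsA is pvRowPairs of the character list
theorem pvPairsA_eq_rowPairs (w : String) : pvPairsA w = pvRowPairs w.toList := by
  rw [← pvPairsA_aux w.toList]
  rfl

-- A's comprehension dict {pair: pairs.count(pair) for pair in unique} is Counter(pairs)
theorem dictA_eq_counter (w : String) :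
    (PySem.Set.ofList (pvPairsA w)).foldl
        (fun d p => d.insert p (((pvPairsA w).count p : Int))) PySem.Dict.empty
      = PySem.Dict.counter (pvPairsA w) := by
  apply PySem.Dict.ext
  rw [PySem.Dict.items_counter]
  have := PySem.Dict.items_foldl_insert_fresh (PySem.Set.ofList (pvPairsA w))
      (id) (fun p => (((pvPairsA w).count p : Int))) (PySem.Dict.empty)
      (by intro a _; rfl)
      (by simp)
  simpa using this

-- occurrences 0..k-1 shifted by one are occurrences 1..k
theorem range_shift (k : Int) (f : Int → String) :
    (PySem.List.pyRange 0 k 1).map (fun c => f (c + 1))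
      = (PySem.List.pyRange 1 (k + 1) 1).map f := by
  rw [PySem.List.pyRange_one, PySem.List.pyRange_one]
  have h : (k - 0).toNat = (k + 1 - 1).toNat := by omega
  rw [h]
  simp only [List.map_map]
  apply List.map_congr_left
  intro a _
  simp [Function.comp]
  ring_nf

-- getD after a fold of modifies: old value plus the matching increments
theorem getD_foldl_modify_add (l : List (String × Int)) (d : PySem.Dict String Int)
    (k : String → String) (p : String) :
    (l.foldl (fun d am => d.modify (k am.1) 0 (· + am.2)) d).getD p 0
      = d.getD p 0 + ((l.filter (fun am => k am.1 == p)).map (·.2)).sum := by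
  induction l generalizing d with
  | nil => simp
  | cons am l ih =>
    simp only [List.foldl_cons, ih, List.filter_cons]
    by_cases h : k am.1 = p
    · simp [h]
      ring
    · simp [h, PySem.Dict.getD_modify, Ne.symm h]

-- a Nodup list whose members all equal a, containing a, is [a]
theorem eq_singleton_of_nodup {α : Type} {l : List α} {a : α} (hn : l.Nodup)
    (hmem : a ∈ l) (hall : ∀ x ∈ l, x = a) : l = [a] := by
  cases l with
  | nil => cases hmem
  | cons b t =>
    have hb : b = a := hall b (by simp)
    subst hb
    have ht : t = [] := by
      cases t with
      | nil => rfl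
      | cons c u =>
        exfalso
        have hc : c = b := hall c (by simp)
        rw [hc] at hn
        simp [List.nodup_cons] at hn
    rw [ht]

-- summing the stored counts of the (at most one) matching distinct key is countP
theorem sum_filter_count (m : List String) (q : String → Bool)
    (hq : ∀ s t, q s = true → q t = true → s = t) :
    ((((PySem.Set.ofList m).map (fun k => (k, (m.count k : Int)))).filter
        (fun am => q am.1)).map (fun am => am.2)).sum = (m.countP q : Int) := by
  rw [List.filter_map]
  by_cases hex : ∃ s ∈ m, q s = true
  · obtain ⟨s0, hs0m, hs0q⟩ := hex
    have hfil : (PySem.Set.ofList m).filter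
        (fun k => (fun am => q am.1) ((fun k => (k, (m.count k : Int))) k)) = [s0] := by
      apply eq_singleton_of_nodup
      · exact (PySem.Set.nodup_ofList m).filter _
      · exact List.mem_filter.mpr ⟨(PySem.Set.mem_ofList _ _).mpr hs0m, hs0q⟩
      · intro x hx
        exact hq x s0 (List.mem_filter.mp hx).2 hs0q
    rw [show ((fun am => q am.1) ∘ (fun k => (k, (m.count k : Int))))
        = fun k => (fun am => q am.1) ((fun k => (k, (m.count k : Int))) k) from rfl, hfil]
    have hcq : m.countP q = m.count s0 := by
      rw [List.count_eq_countP]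
      refine List.countP_congr ?_
      intro x hx
      constructor
      · intro h; simp [hq x s0 h hs0q]
      · intro h; simp at h; rw [h]; exact hs0q
    simp [hcq]
  · rw [not_exists] at hex
    simp only [not_and] at hex
    have hfil : (PySem.Set.ofList m).filter
        (fun k => (fun am => q am.1) ((fun k => (k, (m.count k : Int))) k)) = [] := by
      apply List.filter_eq_nil_iff.mpr
      intro x hx
      exact hex x ((PySem.Set.mem_ofList _ _).mp hx)
    rw [show ((fun am => q am.1) ∘ (fun k => (k, (m.count k : Int))))
        = fun k => (fun am => q am.1) ((fun k => (k, (m.count k : Int))) k) from rfl, hfil]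
    have : m.countP q = 0 := List.countP_eq_zero.mpr hex
    simp [this]

-- appending one character appends one column of pairs, count-wise
theorem count_rowPairs_snoc (u : List Char) (c : Char) (p : String) :
    (pvRowPairs (u ++ [c])).count p
      = (pvRowPairs u).count p + u.countP (fun a => pvKey a c == p) := by
  induction u with
  | nil => simp [pvRowPairs]
  | cons a u ih =>
    simp only [List.cons_append, pvRowPairs, List.map_append, List.count_append,
      List.map_cons, List.map_nil, List.countP_cons, ih, List.count_cons, List.count_nil]
    by_cases h : pvKey a c = p
    · simp [h]; omega
    · simp [h]; omega

-- the second component of a product fold evolves on its own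
theorem foldl_pair_snd {α β γ : Type} (u : List γ) (f : α × β → γ → α) (g : β → γ → β)
    (pd : α × β) :
    (u.foldl (fun pd c => (f pd c, g pd.2 c)) pd).2 = u.foldl g pd.2 := by
  induction u generalizing pd with
  | nil => rfl
  | cons c u ih => exact ih _

-- the second component of the tally loop is the running character counter
-- the tally step, named for the proofs
def pvStep (pd : PySem.Dict String Int × PySem.Dict String Int) (ch : Char) :
    PySem.Dict String Int × PySem.Dict String Int :=
  (pd.2.items.foldl
    (fun cnt am => cnt.modify ("-:" ++ am.1 ++ "," ++ String.singleton ch) 0 (· + am.2)) pd.1,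
   pd.2.modify (String.singleton ch) 0 (· + 1))

theorem pvTallyB_eq (w : String) :
    pvTallyB w = w.toList.foldl pvStep (PySem.Dict.empty, PySem.Dict.empty) := rfl

theorem tally_snd_aux (u : List Char) :
    (u.foldl pvStep (PySem.Dict.empty, PySem.Dict.empty)).2
      = PySem.Dict.counter (u.map String.singleton) := by
  rw [PySem.Dict.counter_eq_foldl, List.foldl_map]
  exact foldl_pair_snd (α := PySem.Dict String Int) (β := PySem.Dict String Int) u
    (fun pd ch => pd.2.items.foldl
      (fun cnt am => cnt.modify ("-:" ++ am.1 ++ "," ++ String.singleton ch) 0 (· + am.2)) pd.1)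
    (fun d ch => d.modify (String.singleton ch) 0 (· + 1))
    (PySem.Dict.empty, PySem.Dict.empty)

theorem tally_fst_aux (u : List Char) (p : String) :
    ((u.foldl pvStep (PySem.Dict.empty, PySem.Dict.empty)).1).getD p 0
      = ((pvRowPairs u).count p : Int) := by
  induction u using List.reverseRecOn with
  | nil => simp [pvRowPairs]
  | append_singleton u ch ih =>
    rw [List.foldl_append, List.foldl_cons, List.foldl_nil]
    have hq : ∀ s t, ("-:" ++ s ++ "," ++ String.singleton ch == p) = true →
        ("-:" ++ t ++ "," ++ String.singleton ch == p) = true → s = t := by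
      intro s t hs ht
      have hs' := eq_of_beq hs
      have ht' := eq_of_beq ht
      exact pvKey_inj_left (hs'.trans ht'.symm)
    calc ((pvStep (u.foldl pvStep (PySem.Dict.empty, PySem.Dict.empty)) ch).1).getD p 0
        = ((u.foldl pvStep (PySem.Dict.empty, PySem.Dict.empty)).1).getD p 0
          + ((((u.foldl pvStep (PySem.Dict.empty, PySem.Dict.empty)).2.items.filter
              (fun am => ("-:" ++ am.1 ++ "," ++ String.singleton ch == p))).map (fun am => am.2)).sum) :=
          getD_foldl_modify_add _ _ (fun s => "-:" ++ s ++ "," ++ String.singleton ch) p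
      _ = ((pvRowPairs u).count p : Int)
          + (((u.map String.singleton).countP (fun s => ("-:" ++ s ++ "," ++ String.singleton ch == p)) : Nat) : Int) := by
          rw [ih, tally_snd_aux, PySem.Dict.items_counter,
            sum_filter_count (u.map String.singleton)
              (fun s => ("-:" ++ s ++ "," ++ String.singleton ch == p)) hq]
      _ = ((pvRowPairs (u ++ [ch])).count p : Int) := by
          rw [List.countP_map, count_rowPairs_snoc]
          have hfn : ((fun s => ("-:" ++ s ++ "," ++ String.singleton ch == p)) ∘ String.singleton)
              = (fun a => pvKey a ch == p) := by funext a; rfl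
          rw [hfn]
          push_cast
          ring

-- the first component of the tally loop counts every pair of the row-major pair list
theorem pvTallyB_fst_getD (w : String) (p : String) :
    (pvTallyB w).1.getD p 0 = ((pvRowPairs w.toList).count p : Int) := by
  rw [pvTallyB_eq]; exact tally_fst_aux w.toList p

-- dedup-with-a-seen-set, relative to already-seen elements
def pvDedupNew (s : PySem.Set String) : List String → List String
  | [] => []
  | p :: l => if p ∈ s then pvDedupNew s l else p :: pvDedupNew (s.add p) l

theorem update_eq_append_dedupNew (l : List String) (s : PySem.Set String) :
    PySem.Set.update s l = s ++ pvDedupNew s l := by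
  induction l generalizing s with
  | nil => simp [PySem.Set.update, pvDedupNew]
  | cons p l ih =>
    by_cases h : p ∈ s
    · have hadd : PySem.Set.add s p = s := by simp [PySem.Set.add, PySem.Set.contains, h]
      calc PySem.Set.update s (p :: l) = PySem.Set.update (PySem.Set.add s p) l := rfl
        _ = PySem.Set.add s p ++ pvDedupNew (PySem.Set.add s p) l := ih _
        _ = s ++ pvDedupNew s (p :: l) := by rw [hadd]; simp [pvDedupNew, h]
    · have hadd : PySem.Set.add s p = s ++ [p] := by simp [PySem.Set.add, PySem.Set.contains, h]
      calc PySem.Set.update s (p :: l) = PySem.Set.update (PySem.Set.add s p) l := rfl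
        _ = PySem.Set.add s p ++ pvDedupNew (PySem.Set.add s p) l := ih _
        _ = s ++ pvDedupNew s (p :: l) := by
              rw [hadd]; simp [pvDedupNew, h, List.append_assoc]

theorem ofList_eq_dedupNew (l : List String) :
    PySem.Set.ofList l = pvDedupNew PySem.Set.empty l := by
  have := update_eq_append_dedupNew l PySem.Set.empty
  simpa [PySem.Set.ofList_eq_foldl, PySem.Set.update, PySem.Set.empty] using this

-- the emission fold appends the expansion of each not-yet-seen pair
theorem emit_foldl (f : String → List String) (l : List String) (s : PySem.Set String) (o : List String) :
    (l.foldl (fun (so : PySem.Set String × List String) p =>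
        if so.1.contains p then so else (so.1.add p, so.2 ++ f p)) (s, o)).2
      = o ++ (pvDedupNew s l).flatMap f := by
  induction l generalizing s o with
  | nil => simp [pvDedupNew]
  | cons p l ih =>
    by_cases h : p ∈ s
    · have hc : s.contains p = true := by simpa [PySem.Set.contains] using h
      simp only [List.foldl_cons, hc, if_true, pvDedupNew, if_pos h]
      exact ih s o
    · have hc : s.contains p = true ↔ False := by simpa [PySem.Set.contains] using h
      simp only [List.foldl_cons, hc, if_false, pvDedupNew, if_neg h]
      rw [ih]
      simp [List.flatMap_cons]

-- ===== VERDICT (by name: the statement is the Claim_ definition above) =====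
theorem s_k_p2_py_spec : Claim_equal_s_k_p2_py := by
  intro w _
  show s_k_p2_py w = s_k_p2_py_alt w
  have hcnt : ∀ p, (pvTallyB w).1.getD p 0 = ((pvPairsA w).count p : Int) := by
    intro p
    rw [pvTallyB_fst_getD, pvPairsA_eq_rowPairs]
  have h1 : s_k_p2_py_alt w = PySem.Set.ofList
      (((pvPairsA w).foldl (fun (so : PySem.Set String × List String) p =>
        if so.1.contains p then so
        else (so.1.add p, so.2 ++ (PySem.List.pyRange 1 ((pvTallyB w).1.getD p 0 + 1) 1).map
          (fun i => PySem.Int.toStr i ++ ":" ++ p))) (PySem.Set.empty, [])).2) := by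
    simp only [s_k_p2_py_alt, pvPairsA, List.foldl_flatMap, List.foldl_map]
  have h2 : s_k_p2_py_alt w = PySem.Set.ofList ((PySem.Set.ofList (pvPairsA w)).flatMap
      (fun p => (PySem.List.pyRange 1 (((pvPairsA w).count p : Int) + 1) 1).map
        (fun i => PySem.Int.toStr i ++ ":" ++ p))) := by
    rw [h1, emit_foldl, ← ofList_eq_dedupNew]
    simp only [List.nil_append, hcnt]
  have hA : s_k_p2_py w = PySem.Set.ofList ((PySem.Set.ofList (pvPairsA w)).flatMap
      (fun p => (PySem.List.pyRange 1 (((pvPairsA w).count p : Int) + 1) 1).map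
        (fun i => PySem.Int.toStr i ++ ":" ++ p))) := by
    simp only [s_k_p2_py, dictA_eq_counter]
    refine congrArg PySem.Set.ofList ?_
    rw [PySem.Dict.keys_counter]
    apply List.flatMap_congr
    intro p _
    simp only [PySem.Dict.getD_counter]
    exact range_shift _ (fun i => PySem.Int.toStr i ++ ":" ++ p)
  rw [hA, h2]
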